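-- pv_equiv track=rewrite | github.com/TumCucTom/Advent-Of-Code-24 | code/25/25.py | calculate_heights
-- ===== SOURCE A (Python) =====
-- def calculate_heights(schematic, is_lock):
--     num_columns = len(schematic[0])
--     heights = []
--     total_height = len(schematic)
--
--     for col in range(num_columns):
--         height = 0
--         if is_lock:  # Measure downward
--             for row in range(total_height):
--                 if schematic[row][col] == '#':
--                     height += 1
--                 else:
--                     break
--         else:  # Measure upward
--             for row in range(total_height - 1, -1, -1):
--                 if schematic[row][col] == '#':
--                     height += 1
--                 else:
--                     break
--         heights.append(height)
--     return heights
-- ===== SOURCE B (Python) =====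
-- def calculate_heights(schematic, is_lock):
--     num_columns = len(schematic[0])
--     heights = [0] * num_columns
--     rows = schematic if is_lock else reversed(schematic)
--     active = list(range(num_columns))
--     for row in rows:
--         if not active:
--             break
--         still = []
--         for col in active:
--             if row[col] == '#':
--                 heights[col] += 1
--                 still.append(col)
--         active = still
--     return heights
-- ===== Notes on version B (the rewrite author's own statement) =====
-- stated objective: alternative
-- what changed: Replaces the per-column inner scans (column-major nested loops with break) by a single row-major sweep that maintains a live list of still-active columns over a preallocated heights array, dropping a column the first time it shows a non-'#' and stopping once no column is active.
import Mathlib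
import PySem

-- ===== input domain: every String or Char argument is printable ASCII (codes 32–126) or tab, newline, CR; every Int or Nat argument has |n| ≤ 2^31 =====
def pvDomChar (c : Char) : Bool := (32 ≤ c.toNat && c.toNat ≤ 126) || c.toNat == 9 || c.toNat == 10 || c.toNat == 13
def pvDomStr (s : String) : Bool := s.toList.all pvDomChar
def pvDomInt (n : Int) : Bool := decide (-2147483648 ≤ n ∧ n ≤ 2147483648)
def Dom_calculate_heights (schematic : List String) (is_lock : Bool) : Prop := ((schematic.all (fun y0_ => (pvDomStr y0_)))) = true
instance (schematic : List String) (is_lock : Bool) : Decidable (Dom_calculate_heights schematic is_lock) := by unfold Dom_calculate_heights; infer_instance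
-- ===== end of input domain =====

-- B replaces A's column-major nested scans by one row-major sweep over a live list of active
-- columns with a preallocated heights array and an early exit (objective: alternative).

-- ===== PORT A =====
-- schematic[row][col]; none where Python raises IndexError (such inputs are outside Pre_,
-- where the port's 'none ≠ '#' → break' is never reached)
def pvAGet (schematic : List String) (row col : Int) : Option Char :=
  (PySem.List.pyGet? schematic row).bind fun r => PySem.Str.pyGet? r col

-- the inner 'for row in …: if … == '#': height += 1 else break' loop
def pvAInner (schematic : List String) (col : Int) (idxs : List Int) (height : Int) : Int :=
  match idxs with
  | [] => height
  | row :: rest =>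
    if pvAGet schematic row col = some '#' then pvAInner schematic col rest (height + 1)
    else height

def calculate_heights (schematic : List String) (is_lock : Bool) : List Int :=
  let num_columns : Int := PySem.Str.len ((PySem.List.pyGet? schematic 0).getD "")
  let total_height : Int := schematic.length
  (PySem.List.pyRange 0 num_columns 1).foldl
    (fun heights col =>
      let idxs := if is_lock then PySem.List.pyRange 0 total_height 1
                  else PySem.List.pyRange (total_height - 1) (-1) (-1)
      heights ++ [pvAInner schematic col idxs 0]) []

-- ===== PORT B =====
-- one row of the sweep: bump heights of still-'#' active columns, keep them in 'still'
-- (row[col] ported as toList[col]?; none where Python raises, outside Pre_)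
def pvBStep (row : String) (heights : List Int) (active : List Nat) : List Int × List Nat :=
  active.foldl
    (fun st col =>
      if (row.toList)[col]? = some '#' then (st.1.modify col (· + 1), st.2 ++ [col])
      else st) (heights, [])

def pvBLoop (rows : List String) (heights : List Int) (active : List Nat) : List Int :=
  match rows with
  | [] => heights
  | r :: rest =>
    if active = [] then heights
    else
      let st := pvBStep r heights active
      pvBLoop rest st.1 st.2

def calculate_heights_alt (schematic : List String) (is_lock : Bool) : List Int :=
  let num_columns : Nat := ((PySem.List.pyGet? schematic 0).getD "").toList.length
  let heights := List.replicate num_columns (0 : Int)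
  let rows := if is_lock then schematic else schematic.reverse
  pvBLoop rows heights (List.range num_columns)

-- ===== PRECONDITION & SPEC =====
-- Pre_ excludes exactly the inputs where Python A raises IndexError: the empty schematic
-- (schematic[0]), and ragged grids where some column's scan (downward for locks, upward for
-- keys) reaches a row too short for that column after an unbroken '#' prefix.
def Pre_calculate_heights (schematic : List String) (is_lock : Bool) : Prop :=
  schematic ≠ [] ∧
  (∀ c, c < ((schematic.headD "").toList.length) →
    ∀ i, i < schematic.length →
      (∀ j, j < i →
        (((if is_lock then schematic else schematic.reverse).getD j "").toList)[c]? = some '#') →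
      c < (((if is_lock then schematic else schematic.reverse).getD i "").toList).length)
instance (schematic : List String) (is_lock : Bool) : Decidable (Pre_calculate_heights schematic is_lock) := by unfold Pre_calculate_heights; infer_instance

def pvWitness_calculate_heights : List String × Bool := (["#.", "#."], true)

def Spec_calculate_heights (schematic : List String) (is_lock : Bool) (out : List Int) : Prop := out = calculate_heights_alt schematic is_lock
instance (schematic : List String) (is_lock : Bool) (out : List Int) : Decidable (Spec_calculate_heights schematic is_lock out) := by unfold Spec_calculate_heights; infer_instance

-- ===== CLAIM (what is proved, stated in full; the proofs are below) =====
def Claim_equal_calculate_heights : Prop := ∀ (schematic : List String) (is_lock : Bool), Dom_calculate_heights schematic is_lock → Pre_calculate_heights schematic is_lock → Spec_calculate_heights schematic is_lock (calculate_heights schematic is_lock)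

-- ===== LEMMAS AND PROOFS =====

-- run length of the '#'-prefix of column c, read down the row list R
def colRun (R : List String) (c : Nat) : Int :=
  match R with
  | [] => 0
  | r :: rest => if (r.toList)[c]? = some '#' then 1 + colRun rest c else 0

-- run length over an explicit list of optional characters
def optRun (l : List (Option Char)) : Int :=
  match l with
  | [] => 0
  | o :: rest => if o = some '#' then 1 + optRun rest else 0

theorem colRun_eq_optRun (R : List String) (c : Nat) :
    colRun R c = optRun (R.map (fun r => (r.toList)[c]?)) := by
  induction R with
  | nil => rfl
  | cons r rest ih => simp [colRun, optRun, ih]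

theorem pvAInner_eq_optRun (s : List String) (c : Int) :
    ∀ (idxs : List Int) (h : Int),
      pvAInner s c idxs h = h + optRun (idxs.map (fun i => pvAGet s i c)) := by
  intro idxs
  induction idxs with
  | nil => intro h; simp [pvAInner, optRun]
  | cons i rest ih =>
    intro h
    simp only [pvAInner, List.map_cons, optRun]
    split_ifs with hc
    · rw [ih]; ring
    · ring

theorem map_pyRange_get (s : List String) (c : Nat) :
    (PySem.List.pyRange 0 (s.length : Int) 1).map (fun i => pvAGet s i (c : Int))
      = s.map (fun r => (r.toList)[c]?) := by
  rw [PySem.List.pyRange_one, List.map_map]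
  apply List.ext_getElem
  · simp
  · intro k h1 h2
    simp only [List.getElem_map, List.getElem_range, Function.comp_apply]
    have hk : k < s.length := by simpa using h1
    have : pvAGet s ((0 : Int) + (k : Nat)) (c : Int) = (s[k].toList)[c]? := by
      simp [pvAGet, PySem.List.pyGet?_natCast, List.getElem?_eq_getElem hk,
        PySem.Str.pyGet?]
    simpa using this

theorem foldl_append_map {α β : Type} (f : α → β) :
    ∀ (l : List α) (init : List β),
      l.foldl (fun a x => a ++ [f x]) init = init ++ l.map f := by
  intro l
  induction l with
  | nil => intro init; simp
  | cons x xs ih => intro init; simp [ih]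

-- the second component of the row fold is the filtered active list
theorem pvBStep_snd (row : String) :
    ∀ (cs : List Nat) (hs : List Int) (acc : List Nat),
      (cs.foldl
        (fun st col =>
          if (row.toList)[col]? = some '#' then (st.1.modify col (· + 1), st.2 ++ [col])
          else st) (hs, acc)).2
        = acc ++ cs.filter (fun c => (row.toList)[c]? = some '#') := by
  intro cs
  induction cs with
  | nil => intro hs acc; simp
  | cons c cs ih =>
    intro hs acc
    by_cases hc : (row.toList)[c]? = some '#' <;>
      simp [List.foldl_cons, ih, hc]

theorem pvBStep_fst_len (row : String) :
    ∀ (cs : List Nat) (hs : List Int) (acc : List Nat),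
      (cs.foldl
        (fun st col =>
          if (row.toList)[col]? = some '#' then (st.1.modify col (· + 1), st.2 ++ [col])
          else st) (hs, acc)).1.length = hs.length := by
  intro cs
  induction cs with
  | nil => intro hs acc; simp
  | cons c cs ih =>
    intro hs acc
    simp only [List.foldl_cons]
    split_ifs with hc <;> simp [ih]

theorem pvBStep_fst_get (row : String) :
    ∀ (cs : List Nat) (hs : List Int) (acc : List Nat), cs.Nodup → ∀ k : Nat,
      (cs.foldl
        (fun st col =>
          if (row.toList)[col]? = some '#' then (st.1.modify col (· + 1), st.2 ++ [col])
          else st) (hs, acc)).1[k]?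
        = if k ∈ cs ∧ (row.toList)[k]? = some '#'
          then hs[k]?.map (· + 1) else hs[k]? := by
  intro cs
  induction cs with
  | nil => intro hs acc _ k; simp
  | cons c cs ih =>
    intro hs acc hnd k
    have hcnotin : c ∉ cs := (List.nodup_cons.mp hnd).1
    have hnd' : cs.Nodup := (List.nodup_cons.mp hnd).2
    simp only [List.foldl_cons]
    by_cases hc : (row.toList)[c]? = some '#'
    · rw [if_pos hc, ih _ _ hnd' k]
      have hmod : (hs.modify c (· + 1))[k]?
          = if c = k then hs[k]?.map (· + 1) else hs[k]? := by
        rw [List.getElem?_modify]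
        by_cases hck : c = k <;> cases hhk : hs[k]? <;> simp [hck]
      by_cases hck : k = c
      · subst hck
        simp [hcnotin, hc, hmod]
      · simp only [hmod, if_neg (Ne.symm hck), List.mem_cons]
        by_cases hkcs : k ∈ cs <;> simp [hck, hkcs]
    · rw [if_neg hc, ih _ _ hnd' k]
      by_cases hck : k = c
      · subst hck; simp [hcnotin, hc]
      · simp [hck]

theorem pvBLoop_len :
    ∀ (R : List String) (hs : List Int) (active : List Nat),
      (pvBLoop R hs active).length = hs.length := by
  intro R
  induction R with
  | nil => intro hs active; rfl
  | cons r rest ih =>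
    intro hs active
    by_cases ha : active = []
    · simp [pvBLoop, ha]
    · simp only [pvBLoop, if_neg ha]
      rw [ih]
      exact pvBStep_fst_len r active hs []

theorem pvBLoop_get :
    ∀ (R : List String) (hs : List Int) (active : List Nat), active.Nodup → ∀ k : Nat,
      (pvBLoop R hs active)[k]?
        = if k ∈ active then hs[k]?.map (· + colRun R k) else hs[k]? := by
  intro R
  induction R with
  | nil =>
    intro hs active _ k
    simp only [pvBLoop, colRun]
    split_ifs <;> (cases hhk : hs[k]? <;> simp)
  | cons r rest ih =>
    intro hs active hnd k
    by_cases ha : active = []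
    · subst ha; simp [pvBLoop]
    · simp only [pvBLoop, if_neg ha]
      have hsnd : (pvBStep r hs active).2
          = active.filter (fun c => (r.toList)[c]? = some '#') := pvBStep_snd r active hs []
      have hnd' : ((pvBStep r hs active).2).Nodup := by
        rw [hsnd]; exact hnd.filter _
      have hfst : (pvBStep r hs active).1[k]?
          = if k ∈ active ∧ (r.toList)[k]? = some '#'
            then hs[k]?.map (· + 1) else hs[k]? := pvBStep_fst_get r active hs [] hnd k
      have hmem : k ∈ (pvBStep r hs active).2
          ↔ (k ∈ active ∧ (r.toList)[k]? = some '#') := by rw [hsnd]; simp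
      rw [ih _ _ hnd' k]
      by_cases hka : k ∈ active
      · by_cases hkh : (r.toList)[k]? = some '#'
        · rw [if_pos (hmem.mpr ⟨hka, hkh⟩), hfst, if_pos ⟨hka, hkh⟩, if_pos hka]
          cases hhk : hs[k]? <;> simp [colRun, hkh] <;> ring
        · rw [if_neg (fun h => hkh (hmem.mp h).2), hfst,
            if_neg (fun h => hkh h.2), if_pos hka]
          cases hhk : hs[k]? <;> simp [colRun, hkh]
      · rw [if_neg (fun h => hka (hmem.mp h).1), hfst,
          if_neg (fun h => hka h.1), if_neg hka]

theorem ports_agree (schematic : List String) (is_lock : Bool) :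
    calculate_heights schematic is_lock = calculate_heights_alt schematic is_lock := by
  set first := ((PySem.List.pyGet? schematic 0).getD "") with hfirst
  set m : Nat := first.toList.length with hm
  set R : List String := if is_lock then schematic else schematic.reverse with hR
  set idxs : List Int :=
    (if is_lock then PySem.List.pyRange 0 (schematic.length : Int) 1
     else PySem.List.pyRange ((schematic.length : Int) - 1) (-1) (-1)) with hidxs
  -- A's result is the per-column map over the column range
  have hA : calculate_heights schematic is_lock
      = (PySem.List.pyRange 0 (m : Int) 1).map (fun col => pvAInner schematic col idxs 0) := by
    simp only [calculate_heights]
    rw [foldl_append_map]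
    simp [PySem.Str.len, hm, hfirst, hidxs]
  -- the chars scanned per column are exactly column c of R
  have hcol : ∀ c : Nat,
      idxs.map (fun i => pvAGet schematic i (c : Int)) = R.map (fun r => (r.toList)[c]?) := by
    intro c
    by_cases hl : is_lock = true
    · simp only [hidxs, hR, hl, if_true]
      exact map_pyRange_get schematic c
    · simp only [hidxs, hR, hl, Bool.false_eq_true, if_false]
      rw [PySem.List.pyRange_neg_one_eq_reverse,
        show ((-1 : Int) + 1) = 0 by ring,
        show ((schematic.length : Int) - 1 + 1) = (schematic.length : Int) by ring,
        List.map_reverse, map_pyRange_get schematic c, ← List.map_reverse]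
  -- B's result, pointwise
  have hBlen : (calculate_heights_alt schematic is_lock).length = m := by
    simp only [calculate_heights_alt]
    rw [pvBLoop_len]
    simp [hm, hfirst]
  have hBget : ∀ k, k < m →
      (calculate_heights_alt schematic is_lock)[k]? = some (colRun R k) := by
    intro k hk
    simp only [calculate_heights_alt]
    rw [← hfirst, ← hm, ← hR,
      pvBLoop_get R (List.replicate m (0 : Int)) (List.range m) List.nodup_range k]
    simp [hk]
  -- assemble
  apply List.ext_getElem?
  intro k
  by_cases hk : k < m
  · rw [hBget k hk, hA,
      PySem.List.getElem?_map_pyRange_zero (fun col => pvAInner schematic col idxs 0) m k hk]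
    rw [Option.some_inj, pvAInner_eq_optRun, hcol k, colRun_eq_optRun]
    ring
  · have h1 : (calculate_heights_alt schematic is_lock)[k]? = none := by
      rw [List.getElem?_eq_none_iff]; omega
    have h2 : (calculate_heights schematic is_lock)[k]? = none := by
      rw [List.getElem?_eq_none_iff, hA]
      simp [PySem.List.pyRange_one]; omega
    rw [h1, h2]

-- ===== VERDICT (by name: the statement is the Claim_ definition above) =====
theorem calculate_heights_spec : Claim_equal_calculate_heights := by
  intro schematic is_lock _ _
  unfold Spec_calculate_heights
  exact ports_agree schematic is_lock
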